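-- pv_equiv track=rewrite | github.com/mrhamm/CryptographyChallenges | Set2/Set2Library.py | count_repeats
-- ===== SOURCE A (Python) =====
-- def count_repeats(string,block_size):
--     blocks = []
--     j = 0
--     while (j+1)*block_size<=len(string):
--         blocks = blocks + [string[j*block_size:(j+1)*block_size]]
--         j=j+1
--     repeats = len(blocks)-len(set(blocks))
--     return repeats
-- ===== SOURCE B (Python) =====
-- def count_repeats(string, block_size):
--     counts = {}
--     rest = string
--     while block_size <= len(rest):
--         head = rest[:block_size]
--         counts[head] = counts.get(head, 0) + 1
--         rest = rest[block_size:]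
--     return sum(counts.values()) - len(counts)
-- ===== Notes on version B (the rewrite author's own statement) =====
-- stated objective: alternative
-- what changed: B consumes the string by chopping off one block-sized prefix at a time into a counter dict and returns sum(values)-len(dict), instead of A's index loop that appends every slice to a growing list and subtracts the set's size.
import Mathlib
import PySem

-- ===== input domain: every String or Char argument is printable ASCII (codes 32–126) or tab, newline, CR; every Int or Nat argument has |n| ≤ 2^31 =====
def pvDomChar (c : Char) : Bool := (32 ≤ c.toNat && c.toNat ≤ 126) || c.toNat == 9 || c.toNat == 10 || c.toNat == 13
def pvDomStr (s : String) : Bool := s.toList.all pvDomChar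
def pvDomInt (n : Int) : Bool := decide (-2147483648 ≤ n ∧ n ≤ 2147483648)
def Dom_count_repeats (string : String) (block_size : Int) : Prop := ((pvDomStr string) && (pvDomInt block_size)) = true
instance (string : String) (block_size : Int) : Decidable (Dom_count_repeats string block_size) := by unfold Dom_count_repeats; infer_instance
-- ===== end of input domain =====

-- B replaces A's index loop (build the whole block list, subtract the set's size) by chopping block-sized
-- prefixes off the string into a counter dict and returning sum(values) - len(dict); same cost, different algorithm.

-- ===== PORT A =====
-- fuel = length+1 only makes the loop total: for block_size ≥ 1 it runs at most length÷block_size times.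
def aLoop (s : List Char) (bs : Int) (blocks : List (List Char)) (j : Int) : Nat → List (List Char)
  | 0 => blocks
  | fuel+1 =>
    if (j+1)*bs ≤ (s.length : Int) then
      aLoop s bs (blocks ++ [PySem.List.slice s (some (j*bs)) (some ((j+1)*bs))]) (j+1) fuel
    else blocks

def count_repeats (string : String) (block_size : Int) : Int :=
  let blocks := aLoop string.toList block_size [] 0 (string.toList.length + 1)
  (blocks.length : Int) - ((PySem.Set.ofList blocks).length : Int)

-- ===== PORT B =====
-- fuel = length+1 only makes the loop total: for block_size ≥ 1 each step shortens rest by block_size ≥ 1.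
def bLoop (bs : Int) (counts : PySem.Dict (List Char) Int) (rest : List Char) : Nat → PySem.Dict (List Char) Int
  | 0 => counts
  | fuel+1 =>
    if bs ≤ (rest.length : Int) then
      let head := PySem.List.slice rest none (some bs)
      bLoop bs (counts.insert head (counts.getD head 0 + 1)) (PySem.List.slice rest (some bs) none) fuel
    else counts

def count_repeats_alt (string : String) (block_size : Int) : Int :=
  let counts := bLoop block_size PySem.Dict.empty string.toList (string.toList.length + 1)
  (PySem.Dict.values counts).sum - (PySem.Dict.size counts : Int)

-- ===== PRECONDITION & SPEC =====
-- A's while loop never terminates when block_size ≤ 0 (the guard (j+1)*block_size ≤ len(string) then holds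
-- forever), so A returns a value exactly when block_size ≥ 1; Pre_ is exactly that halting set.
def Pre_count_repeats (string : String) (block_size : Int) : Prop := 1 ≤ block_size
instance (string : String) (block_size : Int) : Decidable (Pre_count_repeats string block_size) := by unfold Pre_count_repeats; infer_instance
def pvWitness_count_repeats : String × Int := ("abcabcxy", 3)

def Spec_count_repeats (string : String) (block_size : Int) (out : Int) : Prop := out = count_repeats_alt string block_size
instance (string : String) (block_size : Int) (out : Int) : Decidable (Spec_count_repeats string block_size out) := by unfold Spec_count_repeats; infer_instance

-- ===== CLAIM (what is proved, stated in full; the proofs are below) =====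
def Claim_equal_count_repeats : Prop := ∀ (string : String) (block_size : Int), Dom_count_repeats string block_size → Pre_count_repeats string block_size → Spec_count_repeats string block_size (count_repeats string block_size)

-- ===== LEMMAS AND PROOFS =====

-- the common block sequence both loops traverse (proof helper only)
def blocksOf (bs : Int) : List Char → Nat → List (List Char)
  | _, 0 => []
  | rest, fuel+1 =>
    if bs ≤ (rest.length : Int) then
      PySem.List.slice rest none (some bs) :: blocksOf bs (PySem.List.slice rest (some bs) none) fuel
    else []

theorem aLoop_acc (s : List Char) (bs : Int) :
    ∀ (fuel : Nat) (blocks : List (List Char)) (j : Int),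
      aLoop s bs blocks j fuel = blocks ++ aLoop s bs [] j fuel := by
  intro fuel
  induction fuel with
  | zero => intro blocks j; simp [aLoop]
  | succ n ih =>
    intro blocks j
    simp only [aLoop]
    split
    · rw [ih, ih ([] ++ [PySem.List.slice s (some (j*bs)) (some ((j+1)*bs))])]
      simp
    · simp

theorem aLoop_eq_blocksOf (s : List Char) (bs : Int) (hbs : 1 ≤ bs) :
    ∀ (fuel : Nat) (j : Int), 0 ≤ j →
      aLoop s bs [] j fuel = blocksOf bs (s.drop (j*bs).toNat) fuel := by
  intro fuel
  induction fuel with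
  | zero => intro j hj; simp [aLoop, blocksOf]
  | succ n ih =>
    intro j hj
    have ht : 0 ≤ j * bs := mul_nonneg hj (by omega)
    have hguard : ((j+1)*bs ≤ (s.length : Int)) ↔ (bs ≤ ((s.drop (j*bs).toNat).length : Int)) := by
      rw [List.length_drop]
      have : (j+1)*bs = j*bs + bs := by ring
      rw [this]
      omega
    simp only [aLoop, blocksOf]
    by_cases hc : (j+1)*bs ≤ (s.length : Int)
    · rw [if_pos hc, if_pos (hguard.mp hc)]
      rw [aLoop_acc s bs n ([] ++ [PySem.List.slice s (some (j*bs)) (some ((j+1)*bs))])]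
      rw [ih (j+1) (by omega)]
      have hslice : PySem.List.slice s (some (j*bs)) (some ((j+1)*bs))
          = PySem.List.slice (s.drop (j*bs).toNat) none (some bs) := by
        rw [PySem.List.slice_toNat s ht (by positivity), PySem.List.slice_to _ (by omega)]
        congr 1
        have : (j+1)*bs = j*bs + bs := by ring
        rw [this]
        omega
      have hdrop : PySem.List.slice (s.drop (j*bs).toNat) (some bs) none
          = s.drop ((j+1)*bs).toNat := by
        rw [PySem.List.slice_from _ (by omega), List.drop_drop]
        congr 1
        have : (j+1)*bs = j*bs + bs := by ring
        rw [this]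
        omega
      rw [hslice, hdrop]
      simp
    · rw [if_neg hc, if_neg (by rw [← hguard]; exact hc)]

theorem bLoop_eq_foldl (bs : Int) :
    ∀ (fuel : Nat) (rest : List Char) (counts : PySem.Dict (List Char) Int),
      bLoop bs counts rest fuel
        = (blocksOf bs rest fuel).foldl (fun d b => d.insert b (d.getD b 0 + 1)) counts := by
  intro fuel
  induction fuel with
  | zero => intro rest counts; simp [bLoop, blocksOf]
  | succ n ih =>
    intro rest counts
    simp only [bLoop, blocksOf]
    split
    · rw [ih]; rfl
    · rfl

theorem count_instances (L : List (List Char)) :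
    (fun k => @List.count (List Char) List.instBEq k L)
      = (fun k => @List.count (List Char) instBEqOfDecidableEq k L) := by
  funext k
  induction L with
  | nil => rfl
  | cons x t ih => simp [List.count_cons] at ih ⊢; omega

theorem sum_counts_over_nodup (L S : List (List Char)) (hnd : S.Nodup)
    (hmem : ∀ x, x ∈ S ↔ x ∈ L) :
    (S.map (fun k => L.count k)).sum = L.length := by
  have hperm : S.Perm L.dedup := by
    apply List.perm_of_nodup_nodup_toFinset_eq hnd L.nodup_dedup
    ext x
    simp [hmem]
  calc (S.map (fun k => L.count k)).sum
      = (L.dedup.map (fun k => L.count k)).sum := (hperm.map _).sum_eq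
    _ = L.length := by
        rw [count_instances L]
        exact L.sum_map_count_dedup_eq_length

-- ===== VERDICT (by name: the statement is the Claim_ definition above) =====
theorem count_repeats_spec : Claim_equal_count_repeats := by
  intro string block_size _ hpre
  unfold Spec_count_repeats count_repeats count_repeats_alt
  have hbs : 1 ≤ block_size := hpre
  rw [bLoop_eq_foldl, PySem.Dict.foldl_insert_getD_add_one_eq_counter]
  have hA : aLoop string.toList block_size [] 0 (string.toList.length + 1)
      = blocksOf block_size string.toList (string.toList.length + 1) := by
    have := aLoop_eq_blocksOf string.toList block_size hbs (string.toList.length + 1) 0 le_rfl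
    simpa using this
  rw [hA]
  set L := blocksOf block_size string.toList (string.toList.length + 1) with hL
  have hvals : PySem.Dict.values (PySem.Dict.counter L)
      = (PySem.Set.ofList L).map (fun k => (L.count k : Int)) := by
    simp only [PySem.Dict.values, PySem.Dict.items_counter, List.map_map]
    rfl
  have hsize : PySem.Dict.size (PySem.Dict.counter L) = (PySem.Set.ofList L).length := by
    simp only [PySem.Dict.size, PySem.Dict.items_counter, List.length_map]
  have hsum : ((PySem.Set.ofList L).map (fun k => (L.count k : Int))).sum = (L.length : Int) := by
    have h1 : ((PySem.Set.ofList L).map (fun k => (L.count k : Int)))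
        = ((PySem.Set.ofList L).map (fun k => L.count k)).map (fun n : Nat => (n : Int)) := by
      simp [List.map_map, Function.comp]
    rw [h1, ← Nat.cast_list_sum]
    rw [sum_counts_over_nodup L (PySem.Set.ofList L) (PySem.Set.nodup_ofList L)
      (fun x => PySem.Set.mem_ofList L x)]
  simp only [hvals, hsize, hsum]
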